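-- pv_equiv track=rewrite | github.com/MWhitta/YukawaScreening | analysis/critmin/analysis/bond_valence_tracking.py | tracker_mid_sets
-- ===== SOURCE A (Python) =====
-- from typing import Any, Mapping, Sequence
--
-- BUCKETS = ("oxides", "hydroxides")
--
-- def tracker_mid_sets(
--     tracker: Mapping[str, Any],
-- ) -> dict[tuple[str, str, str], set[str]]:
--     mids: dict[tuple[str, str, str], set[str]] = {}
--     for cation, cation_data in tracker.items():
--         for bucket in BUCKETS:
--             candidates = cation_data.get(bucket, {}).get("candidates", [])
--             for status in ("completed", "high_uncertainty", "ready", "no_species"):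
--                 mids[(str(cation), bucket, status)] = {
--                     str(candidate["mid"])
--                     for candidate in candidates
--                     if candidate.get("mid") and candidate.get("status") == status
--                 }
--     return mids
-- ===== SOURCE B (Python) =====
-- # B: one pass over each bucket's candidates with a dispatch on status,
-- # instead of re-scanning the candidates list once per status.
-- BUCKETS = ("oxides", "hydroxides")
-- STATUSES = ("completed", "high_uncertainty", "ready", "no_species")
--
-- def tracker_mid_sets(tracker):
--     mids = {}
--     for cation, cation_data in tracker.items():
--         for bucket in BUCKETS:
--             for status in STATUSES:
--                 mids[(str(cation), bucket, status)] = set()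
--             for candidate in cation_data.get(bucket, {}).get("candidates", []):
--                 status = candidate.get("status")
--                 if candidate.get("mid") and status in STATUSES:
--                     mids[(str(cation), bucket, status)].add(str(candidate["mid"]))
--     return mids
-- ===== Notes on version B (the rewrite author's own statement) =====
-- stated objective: alternative
-- what changed: B seeds the four (cation,bucket,status) keys with empty sets and fills them in a single pass over each bucket's candidates with a dispatch on status, instead of A's four separate filtering re-scans of the candidates list per bucket.
import Mathlib
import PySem

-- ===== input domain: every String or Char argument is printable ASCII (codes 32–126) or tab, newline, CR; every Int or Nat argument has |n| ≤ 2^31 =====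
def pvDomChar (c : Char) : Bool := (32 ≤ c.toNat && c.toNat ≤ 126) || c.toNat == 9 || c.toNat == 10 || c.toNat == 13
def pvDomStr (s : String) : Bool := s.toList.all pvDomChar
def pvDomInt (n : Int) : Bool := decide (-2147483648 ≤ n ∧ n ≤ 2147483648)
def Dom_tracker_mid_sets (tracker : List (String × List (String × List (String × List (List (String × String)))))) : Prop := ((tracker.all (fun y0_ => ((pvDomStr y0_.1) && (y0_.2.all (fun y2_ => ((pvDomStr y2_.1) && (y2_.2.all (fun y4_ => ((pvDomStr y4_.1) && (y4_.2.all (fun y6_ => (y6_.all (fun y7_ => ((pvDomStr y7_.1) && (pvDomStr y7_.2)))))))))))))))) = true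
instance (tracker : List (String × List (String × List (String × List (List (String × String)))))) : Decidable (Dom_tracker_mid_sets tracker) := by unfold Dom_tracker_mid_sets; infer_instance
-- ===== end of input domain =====

-- B groups each bucket's candidates in ONE pass with a dispatch on status (after seeding the
-- four (cation,bucket,status) keys with empty sets) instead of A's four re-scans per bucket;
-- same return value, no mutation of the argument.

-- ===== PORT A =====
def pvBuckets : List String := ["oxides", "hydroxides"]

def pvStatuses : List String := ["completed", "high_uncertainty", "ready", "no_species"]

-- candidates = cation_data.get(bucket, {}).get("candidates", [])  (shared access path, as in both Pythons)
def pvCandsOf (cation_data : List (String × List (String × List (List (String × String))))) (bucket : String) : List (List (String × String)) :=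
  (PySem.Dict.mk ((PySem.Dict.mk cation_data).getD bucket [])).getD "candidates" []

-- the element produced (or not) by A's set-comprehension filter for one candidate and one status:
-- candidate["mid"] when candidate.get("mid") is truthy and candidate.get("status") == status
def pvPick (st : String) (c : List (String × String)) : Option String :=
  match (PySem.Dict.mk c).get? "mid" with
  | some m => if m ≠ "" ∧ (PySem.Dict.mk c).get? "status" = some st then some m else none
  | none => none

-- the returned dict, flattened to the output convention (tuple key spliced with the value)
def pvFlatten (d : PySem.Dict (String × String × String) (PySem.Set String)) : List (String × String × String × List String) :=
  d.items.map (fun q => (q.1.1, q.1.2.1, q.1.2.2, q.2))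

def tracker_mid_sets (tracker : List (String × List (String × List (String × List (List (String × String)))))) : List (String × String × String × List String) :=
  pvFlatten (tracker.foldl (fun mids p =>
    pvBuckets.foldl (fun mids bucket =>
      let candidates := pvCandsOf p.2 bucket
      pvStatuses.foldl (fun mids st =>
        mids.insert (p.1, bucket, st) (PySem.Set.ofList (candidates.filterMap (pvPick st)))) mids)
      mids) PySem.Dict.empty)

-- ===== PORT B =====
-- one candidate step of B's single pass: dispatch on the candidate's status
def pvBStep (cation bucket : String) (mids : PySem.Dict (String × String × String) (PySem.Set String)) (c : List (String × String)) : PySem.Dict (String × String × String) (PySem.Set String) :=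
  match (PySem.Dict.mk c).get? "mid", (PySem.Dict.mk c).get? "status" with
  | some m, some s =>
      if m ≠ "" ∧ s ∈ pvStatuses then mids.modify (cation, bucket, s) PySem.Set.empty (fun t => t.add m) else mids
  | _, _ => mids

def tracker_mid_sets_alt (tracker : List (String × List (String × List (String × List (List (String × String)))))) : List (String × String × String × List String) :=
  pvFlatten (tracker.foldl (fun mids p =>
    pvBuckets.foldl (fun mids bucket =>
      let seeded := pvStatuses.foldl (fun mids st => mids.insert (p.1, bucket, st) PySem.Set.empty) mids
      (pvCandsOf p.2 bucket).foldl (pvBStep p.1 bucket) seeded)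
      mids) PySem.Dict.empty)

-- ===== PRECONDITION & SPEC =====
def Spec_tracker_mid_sets (tracker : List (String × List (String × List (String × List (List (String × String)))))) (out : List (String × String × String × List String)) : Prop := out = tracker_mid_sets_alt tracker
instance (tracker : List (String × List (String × List (String × List (List (String × String)))))) (out : List (String × String × String × List String)) : Decidable (Spec_tracker_mid_sets tracker out) := by unfold Spec_tracker_mid_sets; infer_instance

-- ===== CLAIM (what is proved, stated in full; the proofs are below) =====
def Claim_equal_tracker_mid_sets : Prop := ∀ (tracker : List (String × List (String × List (String × List (List (String × String)))))), Dom_tracker_mid_sets tracker → Spec_tracker_mid_sets tracker (tracker_mid_sets tracker)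

-- ===== LEMMAS AND PROOFS =====

-- mapping the "overwrite key k" function over items without key k does nothing
theorem pv_map_noop {κ ν : Type} [BEq κ] (k : κ) (b : ν) :
    ∀ (l : List (κ × ν)), l.any (fun p => p.1 == k) = false →
      l.map (fun p => if (p.1 == k) = true then (k, b) else p) = l := by
  intro l h
  induction l with
  | nil => rfl
  | cons p t ih =>
    simp only [List.any_cons, Bool.or_eq_false_iff] at h
    simp [h.1, ih h.2]

-- inserting twice at the same key keeps only the last value
theorem pv_insert_insert_self {κ ν : Type} [BEq κ] [LawfulBEq κ] (d : PySem.Dict κ ν) (k : κ) (a b : ν) :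
    (d.insert k a).insert k b = d.insert k b := by
  apply PySem.Dict.ext
  rw [PySem.Dict.items_insert (d.insert k a) k b, if_pos (PySem.Dict.contains_insert_self d k a),
      PySem.Dict.items_insert d k a, PySem.Dict.items_insert d k b]
  by_cases h : d.contains k = true
  · simp only [if_pos h, List.map_map]
    apply List.map_congr_left
    intro p _
    by_cases hp : (p.1 == k) = true <;> simp [Function.comp, hp]
  · have h' : d.items.any (fun p => p.1 == k) = false := by
      unfold PySem.Dict.contains at h
      exact Bool.eq_false_iff.mpr h
    simp only [if_neg h, List.map_append, List.map_cons, List.map_nil]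
    rw [pv_map_noop k b d.items h']
    simp

-- inserts at distinct keys commute when the second key is already present
theorem pv_insert_comm_of_contains {κ ν : Type} [BEq κ] [LawfulBEq κ] (d : PySem.Dict κ ν) (k k' : κ) (v w : ν)
    (h : d.contains k' = true) (hne : k' ≠ k) :
    (d.insert k v).insert k' w = (d.insert k' w).insert k v := by
  have hkk' : (k == k') = false := by simp [hne.symm]
  have hk'k : (k' == k) = false := by simp [hne]
  have hck' : (d.insert k v).contains k' = true := by
    rw [PySem.Dict.contains_insert]; simp [h]
  have hck : (d.insert k' w).contains k = d.contains k := by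
    rw [PySem.Dict.contains_insert]; simp [hkk']
  apply PySem.Dict.ext
  rw [PySem.Dict.items_insert (d.insert k v) k' w, if_pos hck',
      PySem.Dict.items_insert (d.insert k' w) k v, hck,
      PySem.Dict.items_insert d k v, PySem.Dict.items_insert d k' w, if_pos h]
  by_cases hk : d.contains k = true
  · simp only [if_pos hk, List.map_map]
    apply List.map_congr_left
    intro p _
    by_cases h1 : (p.1 == k') = true
    · have hp : p.1 = k' := by simpa using h1
      have h2 : (p.1 == k) = false := by simp [hp, hne]
      simp [Function.comp, h1, h2, hk'k]
    · by_cases h2 : (p.1 == k) = true <;> simp [Function.comp, h1, h2, hkk']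
  · simp only [if_neg hk, List.map_append, List.map_cons, List.map_nil]
    simp [hkk']

-- the four-key seeded dict shape
def pvE (d : PySem.Dict (String × String × String) (PySem.Set String)) (cat bkt : String) (s1 s2 s3 s4 : PySem.Set String) : PySem.Dict (String × String × String) (PySem.Set String) :=
  (((d.insert (cat, bkt, "completed") s1).insert (cat, bkt, "high_uncertainty") s2).insert (cat, bkt, "ready") s3).insert (cat, bkt, "no_species") s4

theorem pvE_mod4 (d : PySem.Dict (String × String × String) (PySem.Set String)) (cat bkt : String) (s1 s2 s3 s4 : PySem.Set String) (f : PySem.Set String → PySem.Set String) :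
    (pvE d cat bkt s1 s2 s3 s4).modify (cat, bkt, "no_species") PySem.Set.empty f = pvE d cat bkt s1 s2 s3 (f s4) := by
  unfold pvE PySem.Dict.modify
  rw [PySem.Dict.getD_insert_self, pv_insert_insert_self]

theorem pvE_mod3 (d : PySem.Dict (String × String × String) (PySem.Set String)) (cat bkt : String) (s1 s2 s3 s4 : PySem.Set String) (f : PySem.Set String → PySem.Set String) :
    (pvE d cat bkt s1 s2 s3 s4).modify (cat, bkt, "ready") PySem.Set.empty f = pvE d cat bkt s1 s2 (f s3) s4 := by
  have c3 : (((d.insert (cat, bkt, "completed") s1).insert (cat, bkt, "high_uncertainty") s2).insert (cat, bkt, "ready") s3).contains (cat, bkt, "ready") = true :=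
    PySem.Dict.contains_insert_self _ _ _
  unfold pvE PySem.Dict.modify
  rw [PySem.Dict.getD_insert, if_neg (by simp), PySem.Dict.getD_insert_self]
  rw [pv_insert_comm_of_contains _ (cat, bkt, "no_species") (cat, bkt, "ready") s4 (f s3) c3 (by simp)]
  rw [pv_insert_insert_self]

theorem pvE_mod2 (d : PySem.Dict (String × String × String) (PySem.Set String)) (cat bkt : String) (s1 s2 s3 s4 : PySem.Set String) (f : PySem.Set String → PySem.Set String) :
    (pvE d cat bkt s1 s2 s3 s4).modify (cat, bkt, "high_uncertainty") PySem.Set.empty f = pvE d cat bkt s1 (f s2) s3 s4 := by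
  have c2 : ((d.insert (cat, bkt, "completed") s1).insert (cat, bkt, "high_uncertainty") s2).contains (cat, bkt, "high_uncertainty") = true :=
    PySem.Dict.contains_insert_self _ _ _
  have c3 : (((d.insert (cat, bkt, "completed") s1).insert (cat, bkt, "high_uncertainty") s2).insert (cat, bkt, "ready") s3).contains (cat, bkt, "high_uncertainty") = true := by
    rw [PySem.Dict.contains_insert]; simp [c2]
  unfold pvE PySem.Dict.modify
  rw [PySem.Dict.getD_insert, if_neg (by simp), PySem.Dict.getD_insert, if_neg (by simp),
      PySem.Dict.getD_insert_self]
  rw [pv_insert_comm_of_contains _ (cat, bkt, "no_species") (cat, bkt, "high_uncertainty") s4 (f s2) c3 (by simp)]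
  rw [pv_insert_comm_of_contains _ (cat, bkt, "ready") (cat, bkt, "high_uncertainty") s3 (f s2) c2 (by simp)]
  rw [pv_insert_insert_self]

theorem pvE_mod1 (d : PySem.Dict (String × String × String) (PySem.Set String)) (cat bkt : String) (s1 s2 s3 s4 : PySem.Set String) (f : PySem.Set String → PySem.Set String) :
    (pvE d cat bkt s1 s2 s3 s4).modify (cat, bkt, "completed") PySem.Set.empty f = pvE d cat bkt (f s1) s2 s3 s4 := by
  have c1 : (d.insert (cat, bkt, "completed") s1).contains (cat, bkt, "completed") = true :=
    PySem.Dict.contains_insert_self _ _ _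
  have c2 : ((d.insert (cat, bkt, "completed") s1).insert (cat, bkt, "high_uncertainty") s2).contains (cat, bkt, "completed") = true := by
    rw [PySem.Dict.contains_insert]; simp [c1]
  have c3 : (((d.insert (cat, bkt, "completed") s1).insert (cat, bkt, "high_uncertainty") s2).insert (cat, bkt, "ready") s3).contains (cat, bkt, "completed") = true := by
    rw [PySem.Dict.contains_insert]; simp [c2]
  unfold pvE PySem.Dict.modify
  rw [PySem.Dict.getD_insert, if_neg (by simp), PySem.Dict.getD_insert, if_neg (by simp),
      PySem.Dict.getD_insert, if_neg (by simp), PySem.Dict.getD_insert_self]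
  rw [pv_insert_comm_of_contains _ (cat, bkt, "no_species") (cat, bkt, "completed") s4 (f s1) c3 (by simp)]
  rw [pv_insert_comm_of_contains _ (cat, bkt, "ready") (cat, bkt, "completed") s3 (f s1) c2 (by simp)]
  rw [pv_insert_comm_of_contains _ (cat, bkt, "high_uncertainty") (cat, bkt, "completed") s2 (f s1) c1 (by simp)]
  rw [pv_insert_insert_self]

-- left-fold accumulation of one status's set
def pvG (st : String) (s : PySem.Set String) (cs : List (List (String × String))) : PySem.Set String :=
  cs.foldl (fun x y => match pvPick st y with | some b => x.add b | none => x) s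

-- B's single pass over the candidates, started on the seeded shape, accumulates all four sets
theorem pvBU (cat bkt : String) (cs : List (List (String × String))) :
    ∀ (d : PySem.Dict (String × String × String) (PySem.Set String)) (s1 s2 s3 s4 : PySem.Set String),
      cs.foldl (pvBStep cat bkt) (pvE d cat bkt s1 s2 s3 s4)
        = pvE d cat bkt (pvG "completed" s1 cs) (pvG "high_uncertainty" s2 cs) (pvG "ready" s3 cs) (pvG "no_species" s4 cs) := by
  induction cs with
  | nil => intro d s1 s2 s3 s4; rfl
  | cons c cs ih =>
    intro d s1 s2 s3 s4
    have hG : ∀ (st : String) (s : PySem.Set String),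
        pvG st s (c :: cs) = pvG st (match pvPick st c with | some m => PySem.Set.add s m | none => s) cs :=
      fun _ _ => rfl
    rw [List.foldl_cons]
    rcases hm : (PySem.Dict.mk c).get? "mid" with _ | m
    · have hp : ∀ st, pvPick st c = none := by intro st; unfold pvPick; rw [hm]
      have hstep : pvBStep cat bkt (pvE d cat bkt s1 s2 s3 s4) c = pvE d cat bkt s1 s2 s3 s4 := by
        unfold pvBStep; rw [hm]
      rw [hstep, ih]
      simp [hG, hp]
    · rcases hs : (PySem.Dict.mk c).get? "status" with _ | s
      · have hp : ∀ st, pvPick st c = none := by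
          intro st; unfold pvPick; rw [hm, hs]; simp
        have hstep : pvBStep cat bkt (pvE d cat bkt s1 s2 s3 s4) c = pvE d cat bkt s1 s2 s3 s4 := by
          unfold pvBStep; rw [hm, hs]
        rw [hstep, ih]
        simp [hG, hp]
      · by_cases hme : m = ""
        · have hp : ∀ st, pvPick st c = none := by
            intro st; unfold pvPick; rw [hm]; simp [hme]
          have hstep : pvBStep cat bkt (pvE d cat bkt s1 s2 s3 s4) c = pvE d cat bkt s1 s2 s3 s4 := by
            unfold pvBStep; rw [hm, hs]; simp [hme]
          rw [hstep, ih]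
          simp [hG, hp]
        · have hpick : ∀ st, pvPick st c = if s = st then some m else none := by
            intro st; unfold pvPick; rw [hm, hs]
            by_cases h : s = st <;> simp [h, hme]
          by_cases h1 : s = "completed"
          · subst h1
            have hstep : pvBStep cat bkt (pvE d cat bkt s1 s2 s3 s4) c = pvE d cat bkt (s1.add m) s2 s3 s4 := by
              unfold pvBStep
              simp only [hm, hs]
              rw [if_pos (⟨hme, by simp [pvStatuses]⟩ : m ≠ "" ∧ ("completed" : String) ∈ pvStatuses)]
              exact pvE_mod1 d cat bkt s1 s2 s3 s4 (fun t => t.add m)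
            rw [hstep, ih]
            simp [hG, hpick]
          · by_cases h2 : s = "high_uncertainty"
            · subst h2
              have hstep : pvBStep cat bkt (pvE d cat bkt s1 s2 s3 s4) c = pvE d cat bkt s1 (s2.add m) s3 s4 := by
                unfold pvBStep
                simp only [hm, hs]
                rw [if_pos (⟨hme, by simp [pvStatuses]⟩ : m ≠ "" ∧ ("high_uncertainty" : String) ∈ pvStatuses)]
                exact pvE_mod2 d cat bkt s1 s2 s3 s4 (fun t => t.add m)
              rw [hstep, ih]
              simp [hG, hpick]
            · by_cases h3 : s = "ready"
              · subst h3
                have hstep : pvBStep cat bkt (pvE d cat bkt s1 s2 s3 s4) c = pvE d cat bkt s1 s2 (s3.add m) s4 := by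
                  unfold pvBStep
                  simp only [hm, hs]
                  rw [if_pos (⟨hme, by simp [pvStatuses]⟩ : m ≠ "" ∧ ("ready" : String) ∈ pvStatuses)]
                  exact pvE_mod3 d cat bkt s1 s2 s3 s4 (fun t => t.add m)
                rw [hstep, ih]
                simp [hG, hpick]
              · by_cases h4 : s = "no_species"
                · subst h4
                  have hstep : pvBStep cat bkt (pvE d cat bkt s1 s2 s3 s4) c = pvE d cat bkt s1 s2 s3 (s4.add m) := by
                    unfold pvBStep
                    simp only [hm, hs]
                    rw [if_pos (⟨hme, by simp [pvStatuses]⟩ : m ≠ "" ∧ ("no_species" : String) ∈ pvStatuses)]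
                    exact pvE_mod4 d cat bkt s1 s2 s3 s4 (fun t => t.add m)
                  rw [hstep, ih]
                  simp [hG, hpick]
                · have hstep : pvBStep cat bkt (pvE d cat bkt s1 s2 s3 s4) c = pvE d cat bkt s1 s2 s3 s4 := by
                    unfold pvBStep; rw [hm, hs]
                    simp [pvStatuses, h1, h2, h3, h4]
                  rw [hstep, ih]
                  simp [hG, hpick, h1, h2, h3, h4]

-- A's per-status comprehension set equals B's accumulated set
theorem pv_set_eq (st : String) (cs : List (List (String × String))) :
    PySem.Set.ofList (cs.filterMap (pvPick st)) = pvG st PySem.Set.empty cs := by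
  rw [PySem.Set.ofList_eq_foldl, List.foldl_filterMap]
  unfold pvG PySem.Set.empty
  congr 1
  funext x y
  cases pvPick st y <;> rfl

-- the per-bucket bodies of the two ports agree on every accumulator dict
theorem pv_bucket_eq (cat bkt : String) (cs : List (List (String × String)))
    (d : PySem.Dict (String × String × String) (PySem.Set String)) :
    cs.foldl (pvBStep cat bkt) (pvStatuses.foldl (fun mids st => mids.insert (cat, bkt, st) PySem.Set.empty) d)
      = pvStatuses.foldl (fun mids st => mids.insert (cat, bkt, st) (PySem.Set.ofList (cs.filterMap (pvPick st)))) d := by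
  simp only [pvStatuses, List.foldl_cons, List.foldl_nil]
  have h := pvBU cat bkt cs d PySem.Set.empty PySem.Set.empty PySem.Set.empty PySem.Set.empty
  unfold pvE at h
  rw [h, pv_set_eq, pv_set_eq, pv_set_eq, pv_set_eq]

-- ===== VERDICT (by name: the statement is the Claim_ definition above) =====
theorem tracker_mid_sets_spec : Claim_equal_tracker_mid_sets := by
  intro tracker _
  unfold Spec_tracker_mid_sets tracker_mid_sets tracker_mid_sets_alt
  have h : (fun (mids : PySem.Dict (String × String × String) (PySem.Set String)) (p : String × List (String × List (String × List (List (String × String))))) =>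
      pvBuckets.foldl (fun mids bucket =>
        let candidates := pvCandsOf p.2 bucket
        pvStatuses.foldl (fun mids st =>
          mids.insert (p.1, bucket, st) (PySem.Set.ofList (candidates.filterMap (pvPick st)))) mids) mids)
    = (fun (mids : PySem.Dict (String × String × String) (PySem.Set String)) (p : String × List (String × List (String × List (List (String × String))))) =>
      pvBuckets.foldl (fun mids bucket =>
        let seeded := pvStatuses.foldl (fun mids st => mids.insert (p.1, bucket, st) PySem.Set.empty) mids
        (pvCandsOf p.2 bucket).foldl (pvBStep p.1 bucket) seeded) mids) := by
    funext mids p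
    simp only [pvBuckets, List.foldl_cons, List.foldl_nil]
    rw [pv_bucket_eq, pv_bucket_eq]
  rw [h]
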